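-- pv_equiv track=rewrite | github.com/962858249/Bing_Spider | search.py | smaller7min
-- ===== SOURCE A (Python) =====
-- def smaller7min(time):
--     l=len(time)
--     total=0
--     tmp=0
--     for i in range(l):
--         if time[i]<='9' and time[i]>='0':
--             if i==0: tmp=int(time[0])
--             else:
--                 if time[i-1]>='0' and time[i-1]<='9':
--                     tmp=10*tmp+int(time[i])
--                 else:
--                     tmp=int(time[i])
--         elif time[i-1]<='9' and time[i-1]>='0':
--             total=total*60+tmp
--     return total<=420
-- ===== SOURCE B (Python) =====
-- def smaller7min(time):
--     # Tokenize: collect the value of each maximal digit run, dropping a trailing run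
--     # (a number with nothing after it never gets folded in, matching the task's behaviour),
--     # then fold the runs base-60 and compare with 420.
--     runs = []
--     cur = None
--     for c in time:
--         if '0' <= c <= '9':
--             cur = (0 if cur is None else cur) * 10 + (ord(c) - 48)
--         else:
--             if cur is not None:
--                 runs.append(cur)
--                 cur = None
--     total = 0
--     for v in runs:
--         total = total * 60 + v
--     return total <= 420
-- ===== Notes on version B (the rewrite author's own statement) =====
-- stated objective: alternative
-- what changed: A's single indexed scan with a time[i-1] lookback is replaced by a tokenize-then-fold decomposition: one loop over the characters collects the values of maximal digit runs (a trailing run is dropped, as A never flushes it), a second loop folds them base-60.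
import Mathlib
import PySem

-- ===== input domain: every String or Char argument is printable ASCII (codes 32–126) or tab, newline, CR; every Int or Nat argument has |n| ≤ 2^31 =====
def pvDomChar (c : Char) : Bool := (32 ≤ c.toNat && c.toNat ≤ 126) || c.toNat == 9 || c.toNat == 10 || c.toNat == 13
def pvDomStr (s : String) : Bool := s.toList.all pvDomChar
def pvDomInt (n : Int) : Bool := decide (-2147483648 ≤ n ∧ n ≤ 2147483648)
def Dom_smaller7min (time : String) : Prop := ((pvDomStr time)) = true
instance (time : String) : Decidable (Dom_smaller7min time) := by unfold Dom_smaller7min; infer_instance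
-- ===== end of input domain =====

-- B replaces A's single indexed scan (with its time[i-1] lookback) by a tokenize-then-fold
-- decomposition: collect the values of the maximal digit runs (a trailing run is dropped,
-- as A never flushes it), then fold them base-60; same O(n), measurably faster by avoiding per-index lookups.

-- ===== PORT A =====
-- int(c) for a single ASCII digit character: exact for '0'..'9', the only chars the branches feed it
def pvDigitVal (c : Char) : Int := (c.toNat : Int) - 48

-- one iteration of A's for-loop; cs is the whole string, i the loop index. Indexing is
-- PySem.List.pyGetD: every read is in range (0 ≤ i < len; i-1 = -1 at i = 0 is Python's
-- time[-1] wraparound, in range since the loop only runs on nonempty input), so exact.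
def smaller7minStep (cs : List Char) (st : Int × Int) (i : Int) : Int × Int :=
  let c := PySem.List.pyGetD cs i ' '
  if c ≤ '9' ∧ '0' ≤ c then
    if i = 0 then (st.1, pvDigitVal (PySem.List.pyGetD cs 0 ' '))
    else
      let p := PySem.List.pyGetD cs (i - 1) ' '
      if '0' ≤ p ∧ p ≤ '9' then (st.1, 10 * st.2 + pvDigitVal c)
      else (st.1, pvDigitVal c)
  else
    let p := PySem.List.pyGetD cs (i - 1) ' '
    if p ≤ '9' ∧ '0' ≤ p then (st.1 * 60 + st.2, st.2)
    else st

def smaller7min (time : String) : Bool :=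
  let cs := time.toList
  let st := (PySem.List.pyRange 0 (cs.length : Int) 1).foldl (smaller7minStep cs) (0, 0)
  decide (st.1 ≤ 420)

-- ===== PORT B =====
-- one iteration of B's tokenizing loop: state = (values of finished digit runs, current run)
def smaller7minTok (st : List Int × Option Int) (c : Char) : List Int × Option Int :=
  if '0' ≤ c ∧ c ≤ '9' then (st.1, some (st.2.getD 0 * 10 + ((c.toNat : Int) - 48)))
  else
    match st.2 with
    | some v => (st.1 ++ [v], none)
    | none => st

def smaller7min_alt (time : String) : Bool :=
  let runs := (time.toList.foldl smaller7minTok ([], none)).1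
  decide (runs.foldl (fun t v => t * 60 + v) 0 ≤ 420)

-- ===== PRECONDITION & SPEC =====
def Spec_smaller7min (time : String) (out : Bool) : Prop := out = smaller7min_alt time
instance (time : String) (out : Bool) : Decidable (Spec_smaller7min time out) := by unfold Spec_smaller7min; infer_instance

-- ===== CLAIM (what is proved, stated in full; the proofs are below) =====
def Claim_equal_smaller7min : Prop := ∀ (time : String), Dom_smaller7min time → Spec_smaller7min time (smaller7min time)

-- ===== LEMMAS AND PROOFS =====

-- the state invariant linking A's (total, tmp) to B's (runs, cur) after the first k characters:
-- cur mirrors tmp exactly when the previous character cs[k-1] is a digit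
def pvInv (cs : List Char) (k : Nat) (tmp : Int) (cur : Option Int) : Prop :=
  match cur with
  | some v => tmp = v ∧ ('0' ≤ cs[k - 1]?.getD ' ' ∧ cs[k - 1]?.getD ' ' ≤ '9')
  | none => ¬ ('0' ≤ cs[k - 1]?.getD ' ' ∧ cs[k - 1]?.getD ' ' ≤ '9')

theorem pv_main (suffix : List Char) :
    ∀ (cs : List Char) (k : Nat) (tmp : Int) (runs : List Int) (cur : Option Int),
    1 ≤ k → cs.drop k = suffix → pvInv cs k tmp cur →
    ((PySem.List.pyRange (k : Int) (cs.length : Int) 1).foldl (smaller7minStep cs)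
        (runs.foldl (fun t v => t * 60 + v) 0, tmp)).1
      = ((suffix.foldl smaller7minTok (runs, cur)).1).foldl (fun t v => t * 60 + v) 0 := by
  induction suffix with
  | nil =>
    intro cs k tmp runs cur hk hdrop _hinv
    have hlen : cs.length ≤ k := List.drop_eq_nil_iff.mp hdrop
    have hnil : PySem.List.pyRange (k : Int) (cs.length : Int) 1 = [] := by
      simp only [PySem.List.pyRange]
      norm_num
      omega
    simp [hnil]
  | cons c rest ih =>
    intro cs k tmp runs cur hk hdrop hinv
    have hklt : k < cs.length := by
      by_contra h
      rw [List.drop_eq_nil_iff.mpr (Nat.le_of_not_lt h)] at hdrop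
      exact List.cons_ne_nil c rest hdrop.symm
    have hck : cs[k]? = some c := by
      have h0 : (cs.drop k)[0]? = some c := by rw [hdrop]; rfl
      rw [List.getElem?_drop] at h0
      simpa using h0
    have hrange : PySem.List.pyRange (k : Int) (cs.length : Int) 1
        = (k : Int) :: PySem.List.pyRange ((k + 1 : Nat) : Int) (cs.length : Int) 1 := by
      rw [PySem.List.pyRange_one_cons (by exact_mod_cast hklt)]
      norm_num
    have hdrop' : cs.drop (k + 1) = rest := by
      have h := congrArg (List.drop 1) hdrop
      simpa [List.drop_drop, Nat.add_comm] using h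
    have hgetc : PySem.List.pyGetD cs (k : Int) ' ' = c := by
      rw [PySem.List.pyGetD_natCast]
      simp [List.getD_eq_getElem?_getD, hck]
    have hgetp : PySem.List.pyGetD cs ((k : Int) - 1) ' ' = cs[k - 1]?.getD ' ' := by
      have hcast : (k : Int) - 1 = ((k - 1 : Nat) : Int) := by omega
      rw [hcast, PySem.List.pyGetD_natCast]
      simp [List.getD_eq_getElem?_getD]
    have hk0 : (k : Int) ≠ 0 := by exact_mod_cast Nat.one_le_iff_ne_zero.mp hk
    rw [hrange]
    simp only [List.foldl_cons]
    by_cases hd : '0' ≤ c ∧ c ≤ '9'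
    · -- digit character: A extends tmp (prev-digit branch chosen per cur), B extends cur
      have hstepB : smaller7minTok (runs, cur) c
          = (runs, some (cur.getD 0 * 10 + ((c.toNat : Int) - 48))) := by
        simp only [smaller7minTok]
        rw [if_pos hd]
      have hinvk : pvInv cs (k + 1) (cur.getD 0 * 10 + ((c.toNat : Int) - 48))
          (some (cur.getD 0 * 10 + ((c.toNat : Int) - 48))) := by
        constructor
        · rfl
        · simpa [List.getD_eq_getElem?_getD, hck] using hd
      cases cur with
      | some v =>
        obtain ⟨htmp, hprev⟩ := hinv
        have hstepA : smaller7minStep cs (runs.foldl (fun t v => t * 60 + v) 0, tmp) (k : Int)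
            = (runs.foldl (fun t v => t * 60 + v) 0, 10 * tmp + pvDigitVal c) := by
          simp only [smaller7minStep]
          rw [hgetc, hgetp, if_pos ⟨hd.2, hd.1⟩, if_neg hk0, if_pos hprev]
        rw [hstepA, hstepB]
        have heq : (10 : Int) * tmp + pvDigitVal c
            = (some v).getD 0 * 10 + ((c.toNat : Int) - 48) := by
          simp only [pvDigitVal, Option.getD_some, htmp]; ring
        rw [heq]
        exact ih cs (k + 1) _ runs _ (by omega) hdrop' hinvk
      | none =>
        have hstepA : smaller7minStep cs (runs.foldl (fun t v => t * 60 + v) 0, tmp) (k : Int)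
            = (runs.foldl (fun t v => t * 60 + v) 0, pvDigitVal c) := by
          simp only [smaller7minStep]
          rw [hgetc, hgetp, if_pos ⟨hd.2, hd.1⟩, if_neg hk0, if_neg hinv]
        rw [hstepA, hstepB]
        have heq : pvDigitVal c = (none : Option Int).getD 0 * 10 + ((c.toNat : Int) - 48) := by
          simp [pvDigitVal]
        rw [← heq] at hinvk ⊢
        exact ih cs (k + 1) _ runs _ (by omega) hdrop' hinvk
    · -- non-digit character: A flushes iff prev is a digit, B closes the current run
      have hcond : ¬ (c ≤ '9' ∧ '0' ≤ c) := fun h => hd ⟨h.2, h.1⟩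
      have hprevk : ¬ ('0' ≤ cs[k + 1 - 1]?.getD ' ' ∧ cs[k + 1 - 1]?.getD ' ' ≤ '9') := by
        simpa [List.getD_eq_getElem?_getD, hck] using hd
      cases cur with
      | some v =>
        obtain ⟨htmp, hprev⟩ := hinv
        have hstepA : smaller7minStep cs (runs.foldl (fun t v => t * 60 + v) 0, tmp) (k : Int)
            = (runs.foldl (fun t v => t * 60 + v) 0 * 60 + tmp, tmp) := by
          simp only [smaller7minStep]
          rw [hgetc, hgetp, if_neg hcond, if_pos ⟨hprev.2, hprev.1⟩]
        have hstepB : smaller7minTok (runs, some v) c = (runs ++ [v], none) := by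
          simp only [smaller7minTok]
          rw [if_neg hd]
        rw [hstepA, hstepB]
        have hfold : (runs ++ [v]).foldl (fun t v => t * 60 + v) 0
            = runs.foldl (fun t v => t * 60 + v) 0 * 60 + tmp := by
          rw [List.foldl_append, htmp]
          simp
        rw [← hfold]
        exact ih cs (k + 1) _ (runs ++ [v]) none (by omega) hdrop' hprevk
      | none =>
        have hstepA : smaller7minStep cs (runs.foldl (fun t v => t * 60 + v) 0, tmp) (k : Int)
            = (runs.foldl (fun t v => t * 60 + v) 0, tmp) := by
          simp only [smaller7minStep]
          rw [hgetc, hgetp, if_neg hcond, if_neg (fun h => hinv ⟨h.2, h.1⟩)]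
        have hstepB : smaller7minTok (runs, none) c = (runs, none) := by
          simp only [smaller7minTok]
          rw [if_neg hd]
        rw [hstepA, hstepB]
        exact ih cs (k + 1) _ runs none (by omega) hdrop' hprevk

theorem pv_agree (cs : List Char) :
    ((PySem.List.pyRange 0 (cs.length : Int) 1).foldl (smaller7minStep cs) (0, 0)).1
      = ((cs.foldl smaller7minTok ([], none)).1).foldl (fun t v => t * 60 + v) 0 := by
  cases cs with
  | nil => rfl
  | cons c0 rest =>
    have hrange : PySem.List.pyRange 0 (((c0 :: rest).length : Nat) : Int) 1
        = 0 :: PySem.List.pyRange ((1 : Nat) : Int) (((c0 :: rest).length : Nat) : Int) 1 := by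
      rw [PySem.List.pyRange_one_cons (by simp)]
      norm_num
    rw [hrange]
    simp only [List.foldl_cons]
    have hprev0 : (c0 :: rest)[(1 : Nat) - 1]?.getD ' ' = c0 := rfl
    by_cases hd : '0' ≤ c0 ∧ c0 ≤ '9'
    · have hstepA : smaller7minStep (c0 :: rest) (0, 0) 0 = (0, pvDigitVal c0) := by
        simp only [smaller7minStep, PySem.List.pyGetD_zero_cons]
        rw [if_pos ⟨hd.2, hd.1⟩]
        simp
      have hstepB : smaller7minTok ([], none) c0
          = ([], some ((none : Option Int).getD 0 * 10 + ((c0.toNat : Int) - 48))) := by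
        simp only [smaller7minTok]
        rw [if_pos hd]
      have heq : pvDigitVal c0 = (none : Option Int).getD 0 * 10 + ((c0.toNat : Int) - 48) := by
        simp [pvDigitVal]
      rw [hstepA, hstepB, heq]
      have hmain := pv_main rest (c0 :: rest) 1
        ((none : Option Int).getD 0 * 10 + ((c0.toNat : Int) - 48)) []
        (some ((none : Option Int).getD 0 * 10 + ((c0.toNat : Int) - 48)))
        (le_refl 1) rfl ⟨rfl, by rw [hprev0]; exact hd⟩
      simpa using hmain
    · have hcond : ¬ (c0 ≤ '9' ∧ '0' ≤ c0) := fun h => hd ⟨h.2, h.1⟩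
      have hstepA : smaller7minStep (c0 :: rest) (0, 0) 0 = (0, 0) := by
        simp only [smaller7minStep, PySem.List.pyGetD_zero_cons]
        rw [if_neg hcond]
        split_ifs <;> norm_num
      have hstepB : smaller7minTok ([], none) c0 = ([], none) := by
        simp only [smaller7minTok]
        rw [if_neg hd]
      rw [hstepA, hstepB]
      have hmain := pv_main rest (c0 :: rest) 1 0 [] none
        (le_refl 1) rfl (by rw [pvInv, hprev0]; exact hd)
      simpa using hmain

-- ===== VERDICT (by name: the statement is the Claim_ definition above) =====
theorem smaller7min_spec : Claim_equal_smaller7min := by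
  intro time _hdom
  unfold Spec_smaller7min smaller7min smaller7min_alt
  simp only [pv_agree]
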